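-- pv_equiv track=rewrite | github.com/KarlenS/AoC | day3.py | path_length_to_intersection
-- ===== SOURCE A (Python) =====
-- from typing import List, Set, Tuple
--
-- def manhattan_distance(p1: List, p2: List):
--     return abs(p2[0] - p1[0]) + abs(p2[1] - p1[1])
--
-- def move(position: List, instruct: str) -> List:
--
--     direct = instruct[0]
--     value = int(instruct[1:])
--
--     if direct == 'R':
--         position[0] += value
--     elif direct == 'L':
--         position[0] -= value
--     elif direct == 'U':
--         position[1] += value
--     elif direct == 'D':
--         position[1] -= value
--     else:
--         raise ValueError(f'Invalid direction {direct}')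
--
--     return position, value
--
-- def is_between(pos1: List, pos2: List, target: List) -> bool:
--
--     if pos1[0] < pos2[0]:
--         x_between = pos1[0] <= target[0] <= pos2[0]
--     else:
--         x_between = pos2[0] <= target[0] <= pos1[0]
--
--     if pos1[1] < pos2[1]:
--         y_between = pos1[1] <= target[1] <= pos2[1]
--     else:
--         y_between = pos2[1] <= target[1] <= pos1[1]
--
--     return x_between and y_between
--
-- def path_length_to_intersection(instructs: List, intersection: Tuple) -> int:
--
--     path_length = 0
--     old_position = [0, 0]
--     intersection = list(intersection)
--
--     for instr in instructs:
--         position, length = move(old_position.copy(),instr)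
--
--         if is_between(old_position,position,intersection):
--             path_length += manhattan_distance(old_position,intersection)
--             break
--         else:
--             path_length += length
--             old_position = position.copy()
--
--     return path_length
-- ===== SOURCE B (Python) =====
-- def path_length_to_intersection(instructs, intersection):
--     tx, ty = intersection
--     x = y = 0
--     path_length = 0
--     deltas = {'R': (1, 0), 'L': (-1, 0), 'U': (0, 1), 'D': (0, -1)}
--     for instr in instructs:
--         if x == tx and y == ty:
--             return path_length
--         dx, dy = deltas[instr[0]]
--         for _ in range(int(instr[1:])):
--             x += dx
--             y += dy
--             path_length += 1
--             if x == tx and y == ty: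
--                 return path_length
--     return path_length
-- ===== Notes on version B (the rewrite author's own statement) =====
-- stated objective: alternative
-- what changed: B replaces A's segment arithmetic (move the whole instruction at once, box-containment test, manhattan-distance on hit) by a unit-step grid walk: a cursor advances one cell at a time, incrementing the path length, and returns the moment the cursor equals the intersection; B trades O(1) arithmetic per instruction for O(magnitude) unit steps. …
-- outside the precondition, e.g. on path_length_to_intersection(['R-3'], (5, 5)): A returns -3, B returns 0; on path_length_to_intersection(['R3', 'X'], (1, 0)): A returns 1, B returns 1
import Mathlib
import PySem

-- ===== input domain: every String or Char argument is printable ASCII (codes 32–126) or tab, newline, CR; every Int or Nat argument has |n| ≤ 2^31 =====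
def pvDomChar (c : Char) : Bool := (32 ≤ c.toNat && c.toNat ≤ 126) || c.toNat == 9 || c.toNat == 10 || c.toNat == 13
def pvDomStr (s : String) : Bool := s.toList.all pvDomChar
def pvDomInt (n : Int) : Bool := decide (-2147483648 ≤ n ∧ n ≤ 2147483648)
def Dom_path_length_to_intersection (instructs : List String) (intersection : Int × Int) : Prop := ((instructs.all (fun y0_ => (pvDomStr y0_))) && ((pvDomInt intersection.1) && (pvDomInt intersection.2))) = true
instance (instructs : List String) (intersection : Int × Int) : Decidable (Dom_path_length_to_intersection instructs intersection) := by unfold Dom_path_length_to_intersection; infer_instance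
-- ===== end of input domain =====

-- B re-implements A's per-instruction segment arithmetic as a unit-step grid walk (alternative decomposition, same return value on the stated domain; no speed claim).


-- ===== PORT A =====
-- move(position, instruct): instruct[0] and int(instruct[1:]); none = the IndexError/ValueError Python raises
-- (instruct[1:] on a nonempty string is exactly 'drop the first character', so the toList pattern match is exact).
def pvA_move (pos : Int × Int) (instr : String) : Option ((Int × Int) × Int) :=
  match instr.toList with
  | [] => none                                    -- instruct[0] -> IndexError
  | c :: rest =>
    match PySem.Int.ofChars? rest with            -- int(instruct[1:])
    | none => none                                -- ValueError
    | some v =>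
      if c = 'R' then some ((pos.1 + v, pos.2), v)
      else if c = 'L' then some ((pos.1 - v, pos.2), v)
      else if c = 'U' then some ((pos.1, pos.2 + v), v)
      else if c = 'D' then some ((pos.1, pos.2 - v), v)
      else none                                   -- raise ValueError('Invalid direction')

def pvA_between (p1 p2 t : Int × Int) : Bool :=
  (if p1.1 < p2.1 then decide (p1.1 ≤ t.1 ∧ t.1 ≤ p2.1) else decide (p2.1 ≤ t.1 ∧ t.1 ≤ p1.1)) &&
  (if p1.2 < p2.2 then decide (p1.2 ≤ t.2 ∧ t.2 ≤ p2.2) else decide (p2.2 ≤ t.2 ∧ t.2 ≤ p1.2))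

def pvA_manhattan (p1 p2 : Int × Int) : Int := |p2.1 - p1.1| + |p2.2 - p1.2|

-- the for-loop of path_length_to_intersection, state = (path_length, old_position)
def pvA_loop (instructs : List String) (inter : Int × Int) (pl : Int) (old : Int × Int) : Int :=
  match instructs with
  | [] => pl
  | instr :: rest =>
    match pvA_move old instr with
    | none => pl                                  -- Python raises here (outside Pre_); value unclaimed
    | some (pos, len) =>
      if pvA_between old pos inter then pl + pvA_manhattan old inter   -- break
      else pvA_loop rest inter (pl + len) pos

def path_length_to_intersection (instructs : List String) (intersection : Int × Int) : Int :=
  pvA_loop instructs intersection 0 (0, 0)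

-- ===== PORT B =====
def pvB_delta (c : Char) : Option (Int × Int) :=
  if c = 'R' then some (1, 0) else if c = 'L' then some (-1, 0)
  else if c = 'U' then some (0, 1) else if c = 'D' then some (0, -1) else none

-- the inner 'for _ in range(v)' walk: returns (hit?, x, y, path_length)
def pvB_walk (n : Nat) (x y dx dy tx ty pl : Int) : Bool × Int × Int × Int :=
  match n with
  | 0 => (false, x, y, pl)
  | n + 1 =>
    let x' := x + dx
    let y' := y + dy
    let pl' := pl + 1
    if x' = tx ∧ y' = ty then (true, x', y', pl')
    else pvB_walk n x' y' dx dy tx ty pl'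

def pvB_go (instructs : List String) (tx ty x y pl : Int) : Int :=
  match instructs with
  | [] => pl
  | instr :: rest =>
    if x = tx ∧ y = ty then pl
    else
      match instr.toList with
      | [] => pl                                  -- instr[0] -> IndexError (outside Pre_)
      | c :: digits =>
        match pvB_delta c, PySem.Int.ofChars? digits with
        | some (dx, dy), some v =>
          match pvB_walk v.toNat x y dx dy tx ty pl with    -- range(v) is empty for v < 0
          | (true, _, _, pl') => pl'
          | (false, x', y', pl') => pvB_go rest tx ty x' y' pl'
        | _, _ => pl                              -- KeyError/ValueError (outside Pre_)

def path_length_to_intersection_alt (instructs : List String) (intersection : Int × Int) : Int :=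
  pvB_go instructs intersection.1 intersection.2 0 0 0

-- ===== PRECONDITION & SPEC =====
-- Pre_ restricts to the natural wire domain: every instruction is a direction letter R/L/U/D followed by a
-- NONNEGATIVE int literal.  Excluded are (a) inputs where A raises (IndexError/ValueError) once a malformed
-- instruction is reached, and (b) negative magnitudes such as 'R-3', outside the wire domain, where A's
-- accumulation of the signed parsed value instead of a distance is an accident of its implementation.
def pvValidInstr (s : String) : Bool :=
  match s.toList with
  | [] => false
  | c :: rest =>
    (c = 'R' || c = 'L' || c = 'U' || c = 'D') &&
    (match PySem.Int.ofChars? rest with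
     | some v => decide (0 ≤ v)
     | none => false)

def Pre_path_length_to_intersection (instructs : List String) (_intersection : Int × Int) : Prop :=
  ∀ s ∈ instructs, pvValidInstr s = true

instance (instructs : List String) (intersection : Int × Int) : Decidable (Pre_path_length_to_intersection instructs intersection) := by unfold Pre_path_length_to_intersection; infer_instance

def pvWitness_path_length_to_intersection : List String × (Int × Int) := (["R8", "U5", "L5", "D3"], (6, 5))

def Spec_path_length_to_intersection (instructs : List String) (intersection : Int × Int) (out : Int) : Prop := out = path_length_to_intersection_alt instructs intersection
instance (instructs : List String) (intersection : Int × Int) (out : Int) : Decidable (Spec_path_length_to_intersection instructs intersection out) := by unfold Spec_path_length_to_intersection; infer_instance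

-- ===== CLAIM (what is proved, stated in full; the proofs are below) =====
def Claim_equal_path_length_to_intersection : Prop := ∀ (instructs : List String) (intersection : Int × Int), Dom_path_length_to_intersection instructs intersection → Pre_path_length_to_intersection instructs intersection → Spec_path_length_to_intersection instructs intersection (path_length_to_intersection instructs intersection)

-- ===== LEMMAS AND PROOFS =====

-- characterisation of the unit-step walk along +x (the other three directions are symmetric)
theorem pvB_walk_R (n : Nat) (x y tx ty pl : Int) :
    pvB_walk n x y 1 0 tx ty pl =
      if y = ty ∧ x < tx ∧ tx ≤ x + n then (true, tx, y, pl + (tx - x))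
      else (false, x + n, y, pl + n) := by
  induction n generalizing x pl with
  | zero =>
    simp only [pvB_walk, Nat.cast_zero, add_zero, sub_zero]
    split_ifs with h1
    · exfalso; omega
    · rfl
  | succ n ih =>
    simp only [pvB_walk, ih, add_zero]
    split_ifs <;> push_cast at * <;>
      simp only [Prod.mk.injEq, true_and, reduceCtorEq, false_and] <;> omega

theorem pvB_walk_L (n : Nat) (x y tx ty pl : Int) :
    pvB_walk n x y (-1) 0 tx ty pl =
      if y = ty ∧ tx < x ∧ x - n ≤ tx then (true, tx, y, pl + (x - tx))
      else (false, x - n, y, pl + n) := by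
  induction n generalizing x pl with
  | zero =>
    simp only [pvB_walk, Nat.cast_zero, add_zero, sub_zero]
    split_ifs with h1
    · exfalso; omega
    · rfl
  | succ n ih =>
    simp only [pvB_walk, ih, add_zero]
    split_ifs <;> push_cast at * <;>
      simp only [Prod.mk.injEq, true_and, reduceCtorEq, false_and] <;> omega

theorem pvB_walk_U (n : Nat) (x y tx ty pl : Int) :
    pvB_walk n x y 0 1 tx ty pl =
      if x = tx ∧ y < ty ∧ ty ≤ y + n then (true, x, ty, pl + (ty - y))
      else (false, x, y + n, pl + n) := by
  induction n generalizing y pl with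
  | zero =>
    simp only [pvB_walk, Nat.cast_zero, add_zero, sub_zero]
    split_ifs with h1
    · exfalso; omega
    · rfl
  | succ n ih =>
    simp only [pvB_walk, ih, add_zero]
    split_ifs <;> push_cast at * <;>
      simp only [Prod.mk.injEq, true_and, reduceCtorEq, false_and] <;> omega

theorem pvB_walk_D (n : Nat) (x y tx ty pl : Int) :
    pvB_walk n x y 0 (-1) tx ty pl =
      if x = tx ∧ ty < y ∧ y - n ≤ ty then (true, x, ty, pl + (y - ty))
      else (false, x, y - n, pl + n) := by
  induction n generalizing y pl with
  | zero =>
    simp only [pvB_walk, Nat.cast_zero, add_zero, sub_zero]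
    split_ifs with h1
    · exfalso; omega
    · rfl
  | succ n ih =>
    simp only [pvB_walk, ih, add_zero]
    split_ifs <;> push_cast at * <;>
      simp only [Prod.mk.injEq, true_and, reduceCtorEq, false_and] <;> omega

-- main loop agreement
theorem pvLoop_agree (instructs : List String) (tx ty x y pl : Int)
    (hpre : ∀ s ∈ instructs, pvValidInstr s = true) :
    pvA_loop instructs (tx, ty) pl (x, y) = pvB_go instructs tx ty x y pl := by
  induction instructs generalizing x y pl with
  | nil => rfl
  | cons instr rest ih =>
    have hv := hpre instr (List.mem_cons_self ..)
    have hrest : ∀ s ∈ rest, pvValidInstr s = true := fun s hs => hpre s (List.mem_cons_of_mem _ hs)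
    unfold pvA_loop pvB_go
    cases hcl : instr.toList with
    | nil => simp [pvValidInstr, hcl] at hv
    | cons c digits =>
      cases hparse : PySem.Int.ofChars? digits with
      | none => simp [pvValidInstr, hcl, hparse] at hv
      | some v =>
        simp only [pvValidInstr, hcl, hparse, Bool.and_eq_true, Bool.or_eq_true,
          decide_eq_true_eq] at hv
        obtain ⟨hdir, hv0⟩ := hv
        have hn : (v.toNat : Int) = v := Int.toNat_of_nonneg hv0
        rcases hdir with ((h | h) | h) | h <;> subst h <;>
          simp only [pvA_move, pvB_delta, hcl, hparse, if_true, if_false,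
            Char.reduceEq] <;>
          [rw [pvB_walk_R]; rw [pvB_walk_L]; rw [pvB_walk_U]; rw [pvB_walk_D]] <;>
          rw [hn] <;>
          simp only [pvA_between, pvA_manhattan] <;>
          split_ifs <;> simp_all <;>
          first
          | omega
          | (rw [ih])
          | (rw [ih _ _ _ hrest]; try (congr 1; omega))
          | (exact ih _ _ _ hrest)
          | (exact ih _ _ _)
          | (rw [abs_of_nonneg (by omega)])
          | (rw [abs_of_nonpos (by omega)]; omega)

-- ===== VERDICT (by name: the statement is the Claim_ definition above) =====
theorem path_length_to_intersection_spec : Claim_equal_path_length_to_intersection := by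
  intro instructs intersection _ hpre
  unfold Spec_path_length_to_intersection path_length_to_intersection path_length_to_intersection_alt
  obtain ⟨tx, ty⟩ := intersection
  exact pvLoop_agree instructs tx ty 0 0 0 hpre
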